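-- pv_equiv track=rewrite | github.com/jl908069/gum_sum_salience | score.py | sal_coref_cluster
-- ===== SOURCE A (Python) =====
-- def find_coref_chain(start_tuple, file_result, used_indices):
--     chain = [start_tuple[0]]  # Start with the word span of the first tuple
--     current_word_index = start_tuple[1].split(',')[0].strip()  # Only use the first word index
--     current_coref_indices = [ci.strip() for ci in start_tuple[2].split(',')]
--
--     while True:
--         found = False
--         for tup in file_result:
--             if tup in used_indices:
--                 continue
--
--             words, word_indices, coref_indices = tup
--             first_word_index = word_indices.split(',')[0].strip()  # Only check the first index
--             coref_indices_list = [ci.strip() for ci in coref_indices.split(',')]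
--
--             if first_word_index in current_coref_indices:
--                 chain.append(words)
--                 used_indices.add(tup)
--                 current_word_index = first_word_index
--                 current_coref_indices = coref_indices_list
--                 found = True
--                 break
--
--         if not found:
--             break
--
--     return tuple(chain)
--
-- def sal_coref_cluster(sal_mentions):
--     coref_clusters = []
--     pronouns = {'he', 'she', 'it', 'they', 'we', 'i', 'you',
--                 'him', 'her', 'them', 'us', 'me', 'it', 'there',
--                 'his', 'hers', 'its', 'their', 'our', 'my', 'your',
--                 'He', 'She', 'It', 'They', 'We', 'I', 'You',
--                 'Him', 'Her', 'Them', 'Us', 'Me', 'It', 'There',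
--                 'His', 'Hers', 'Its', 'Their', 'Our', 'My', 'Your'}
--
--     for file_result in sal_mentions:
--         cluster = []
--         used_indices = set()
--
--         for tup in file_result:
--             words, word_indices, coref_indices = tup
--
--             if coref_indices == "":
--                 if words not in pronouns:
--                     cluster.append((words,))
--                 continue
--
--             if tup not in used_indices:
--                 coref_chain = find_coref_chain(tup, file_result, used_indices)
--                 if len(coref_chain) > 1:
--                     cluster.append(coref_chain)
--                 used_indices.add(tup)
--
--         coref_clusters.append(cluster)
--
--     return coref_clusters
-- ===== SOURCE B (Python) =====
-- def sal_coref_cluster(sal_mentions):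
--     pronouns = {'he', 'she', 'it', 'they', 'we', 'i', 'you',
--                 'him', 'her', 'them', 'us', 'me', 'there',
--                 'his', 'hers', 'its', 'their', 'our', 'my', 'your',
--                 'He', 'She', 'It', 'They', 'We', 'I', 'You',
--                 'Him', 'Her', 'Them', 'Us', 'Me', 'There',
--                 'His', 'Hers', 'Its', 'Their', 'Our', 'My', 'Your'}
--     coref_clusters = []
--     for file_result in sal_mentions:
--         # distinct mentions in first-occurrence order, with a position map
--         seen = {}
--         order = []
--         for tup in file_result:
--             if tup not in seen:
--                 seen[tup] = len(order)
--                 order.append(tup)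
--         # parse every string ONCE; index positions by first word index
--         ciss = []
--         index = {}
--         for pos, tup in enumerate(order):
--             fwi = tup[1].split(',')[0].strip()
--             ciss.append([c.strip() for c in tup[2].split(',')])
--             index.setdefault(fwi, []).append(pos)
--         used = [False] * len(order)
--         cluster = []
--         for tup in file_result:
--             words, _, coref = tup
--             if coref == "":
--                 if words not in pronouns:
--                     cluster.append((words,))
--                 continue
--             pos = seen[tup]
--             if used[pos]:
--                 continue
--             chain = [words]
--             cur = ciss[pos]
--             while True:
--                 best = None
--                 for ci in cur:
--                     for p in index.get(ci, ()):
--                         if not used[p]: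
--                             best = p if best is None else min(best, p)
--                             break
--                 if best is None:
--                     break
--                 used[best] = True
--                 chain.append(order[best][0])
--                 cur = ciss[best]
--             used[pos] = True
--             if len(chain) > 1:
--                 cluster.append(tuple(chain))
--         coref_clusters.append(cluster)
--     return coref_clusters
-- ===== Notes on version B (the rewrite author's own statement) =====
-- stated objective: faster
-- what changed: B dedupes the mentions once, parses every string exactly once, builds a dict indexing positions by first word index, and follows each chain by dict lookups over a boolean used-array, instead of A's per-chain-step full rescans of the raw list that re-split every mention's strings against a growing used-set.
import Mathlib
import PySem

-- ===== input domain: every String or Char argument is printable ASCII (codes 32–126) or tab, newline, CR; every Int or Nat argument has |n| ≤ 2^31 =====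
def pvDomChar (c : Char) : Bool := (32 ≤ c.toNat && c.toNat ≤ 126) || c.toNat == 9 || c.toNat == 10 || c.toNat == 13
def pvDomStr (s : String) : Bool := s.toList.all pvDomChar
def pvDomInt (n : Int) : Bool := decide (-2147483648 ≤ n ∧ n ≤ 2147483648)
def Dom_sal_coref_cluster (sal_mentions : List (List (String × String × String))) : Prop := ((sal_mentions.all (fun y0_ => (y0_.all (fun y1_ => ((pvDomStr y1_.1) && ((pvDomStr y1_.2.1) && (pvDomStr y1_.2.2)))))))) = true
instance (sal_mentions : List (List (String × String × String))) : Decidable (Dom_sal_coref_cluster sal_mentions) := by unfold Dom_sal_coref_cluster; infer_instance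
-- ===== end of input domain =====

-- B replaces A's repeated linear rescans of the raw mention list by a positional index:
-- it dedupes the mentions once, parses each string once, indexes positions by first word
-- index in a dict, and follows chains by dict lookup over a boolean used-array (alternative,
-- removes the per-step rescan-and-resplit of every mention).

-- ===== PORT A =====
-- shared parsing helpers (used verbatim by both programs):
-- tup[1].split(',')[0].strip() — the separator "," is non-empty so split? is always `some` (getD []
-- never fires) and the result list is non-empty, so [0] is the head
def pvFwi (t : String × String × String) : String :=
  PySem.Str.strip ((((PySem.Str.split? t.2.1 ",").getD []).headD ""))
-- [ci.strip() for ci in tup[2].split(',')]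
def pvCis (t : String × String × String) : List String :=
  ((PySem.Str.split? t.2.2 ",").getD []).map (fun c => PySem.Str.strip c)
-- the pronoun set literal of A (duplicates in the literal collapse as in Python)
def pvPronouns : PySem.Set String :=
  PySem.Set.ofList ["he", "she", "it", "they", "we", "i", "you",
    "him", "her", "them", "us", "me", "it", "there",
    "his", "hers", "its", "their", "our", "my", "your",
    "He", "She", "It", "They", "We", "I", "You",
    "Him", "Her", "Them", "Us", "Me", "It", "There",
    "His", "Hers", "Its", "Their", "Our", "My", "Your"]

-- the inner 'for tup in file_result: if tup in used: continue; … if first in cur: … break' scan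
def pvFindA (file_result : List (String × String × String))
    (used : PySem.Set (String × String × String)) (curCis : List String) :
    Option (String × String × String) :=
  file_result.find? (fun tup => !(PySem.Set.contains used tup) && curCis.contains (pvFwi tup))

-- find_coref_chain's 'while True' loop; fuel (file_result.length + 1) is an upper bound on its
-- iterations, since every successful scan adds a fresh element of file_result to 'used'
def pvChainA (file_result : List (String × String × String)) :
    Nat → List String → List String → PySem.Set (String × String × String) →
    List String × PySem.Set (String × String × String)
  | 0, chain, _, used => (chain, used)
  | fuel + 1, chain, curCis, used =>
    match pvFindA file_result used curCis with
    | none => (chain, used)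
    | some tup => pvChainA file_result fuel (chain ++ [tup.1]) (pvCis tup) (PySem.Set.add used tup)

def pvStepA (file_result : List (String × String × String))
    (st : List (List String) × PySem.Set (String × String × String))
    (tup : String × String × String) :
    List (List String) × PySem.Set (String × String × String) :=
  if tup.2.2 == "" then
    (if PySem.Set.contains pvPronouns tup.1 then st else (st.1 ++ [[tup.1]], st.2))
  else if PySem.Set.contains st.2 tup then st
  else
    let r := pvChainA file_result (file_result.length + 1) [tup.1] (pvCis tup) st.2
    ((if r.1.length > 1 then st.1 ++ [r.1] else st.1), PySem.Set.add r.2 tup)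

def sal_coref_cluster (sal_mentions : List (List (String × String × String))) :
    List (List (List String)) :=
  sal_mentions.map (fun file_result =>
    (file_result.foldl (pvStepA file_result) ([], PySem.Set.empty)).1)

-- ===== PORT B =====
-- first loop of B: 'seen' position dict and 'order', the distinct mentions in first-occurrence
-- order (positions are list indices, hence Nat)
def pvSeenOrder (file_result : List (String × String × String)) :
    PySem.Dict (String × String × String) Nat × List (String × String × String) :=
  file_result.foldl
    (fun st tup =>
      if PySem.Dict.contains st.1 tup then st
      else (PySem.Dict.insert st.1 tup st.2.length, st.2 ++ [tup]))
    (PySem.Dict.empty, [])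

-- second loop of B over enumerate(order): parse every string once (ciss) and index
-- positions by first word index (index.setdefault(fwi, []).append(pos) = modify-append)
def pvParse (order : List (String × String × String)) :
    List (List String) × PySem.Dict String (List Nat) :=
  order.zipIdx.foldl
    (fun st p =>
      (st.1 ++ [pvCis p.1], PySem.Dict.modify st.2 (pvFwi p.1) [] (· ++ [p.2])))
    ([], PySem.Dict.empty)

-- 'best = None; for ci in cur: for p in index.get(ci, ()): if not used[p]: best = …; break'
-- (used[p] is always in range: every indexed position is < len(used); getD's default never fires)
def pvBestB (index : PySem.Dict String (List Nat)) (used : List Bool) (cur : List String) :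
    Option Nat :=
  cur.foldl
    (fun best ci =>
      match (PySem.Dict.getD index ci []).find? (fun p => !(used.getD p true)) with
      | none => best
      | some p => some (match best with | none => p | some b => min b p))
    none

-- B's 'while True' chain loop; fuel (len(order) + 1) bounds its iterations, since every
-- successful step flips one of the len(order) used-flags from False to True
def pvChainLoopB (order : List (String × String × String)) (ciss : List (List String))
    (index : PySem.Dict String (List Nat)) :
    Nat → List String → List String → List Bool → List String × List Bool
  | 0, chain, _, used => (chain, used)
  | fuel + 1, chain, cur, used =>
    match pvBestB index used cur with
    | none => (chain, used)
    | some b =>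
      pvChainLoopB order ciss index fuel (chain ++ [(order.getD b ("", "", "")).1])
        (ciss.getD b []) (used.set b true)

-- body of B's outer 'for tup in file_result' loop (seen[tup] always hits: every tup of the
-- file was inserted by the first loop, so get?'s getD 0 default never fires; likewise
-- used[pos]/ciss[pos] are in range)
def pvStepB (seen : PySem.Dict (String × String × String) Nat)
    (order : List (String × String × String)) (ciss : List (List String))
    (index : PySem.Dict String (List Nat))
    (st : List (List String) × List Bool) (tup : String × String × String) :
    List (List String) × List Bool :=
  if tup.2.2 == "" then
    (if PySem.Set.contains pvPronouns tup.1 then st else (st.1 ++ [[tup.1]], st.2))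
  else
    let pos := (PySem.Dict.get? seen tup).getD 0
    if st.2.getD pos true then st
    else
      let r := pvChainLoopB order ciss index (order.length + 1) [tup.1] (ciss.getD pos []) st.2
      ((if r.1.length > 1 then st.1 ++ [r.1] else st.1), r.2.set pos true)

def sal_coref_cluster_alt (sal_mentions : List (List (String × String × String))) :
    List (List (List String)) :=
  sal_mentions.map (fun file_result =>
    let so := pvSeenOrder file_result
    let pi := pvParse so.2
    (file_result.foldl (pvStepB so.1 so.2 pi.1 pi.2)
      ([], List.replicate so.2.length false)).1)

-- ===== PRECONDITION & SPEC =====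
def Spec_sal_coref_cluster (sal_mentions : List (List (String × String × String))) (out : List (List (List String))) : Prop := out = sal_coref_cluster_alt sal_mentions
instance (sal_mentions : List (List (String × String × String))) (out : List (List (List String))) : Decidable (Spec_sal_coref_cluster sal_mentions out) := by unfold Spec_sal_coref_cluster; infer_instance

-- ===== CLAIM (what is proved, stated in full; the proofs are below) =====
def Claim_equal_sal_coref_cluster : Prop := ∀ (sal_mentions : List (List (String × String × String))), Dom_sal_coref_cluster sal_mentions → Spec_sal_coref_cluster sal_mentions (sal_coref_cluster sal_mentions)

-- ===== LEMMAS AND PROOFS =====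

-- the default mention used for positional reads
def pvD : String × String × String := ("", "", "")

-- the distinct mentions of l not in u, in first-occurrence order
def pvKeyFilter (u : List (String × String × String)) :
    List (String × String × String) → List (String × String × String)
  | [] => []
  | x :: xs => if x ∈ u then pvKeyFilter u xs else x :: pvKeyFilter (u ++ [x]) xs

theorem pvKeyFilter_cons (u : List (String × String × String))
    (x : String × String × String) (xs : List (String × String × String)) :
    pvKeyFilter u (x :: xs) =
      if x ∈ u then pvKeyFilter u xs else x :: pvKeyFilter (u ++ [x]) xs := rfl

theorem pvFind?_congr {α : Type} (p q : α → Bool) (l : List α)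
    (h : ∀ x ∈ l, p x = q x) : l.find? p = l.find? q := by
  induction l with
  | nil => rfl
  | cons a l ih =>
    simp only [List.find?_cons]
    rw [h a (by simp)]
    cases q a <;> simp [ih (fun x hx => h x (by simp [hx]))]

theorem pvFind?_filter {α : Type} (l : List α) (p q : α → Bool) :
    (l.filter p).find? q = l.find? (fun a => p a && q a) := by
  induction l with
  | nil => rfl
  | cons a l ih => by_cases h : p a <;> by_cases h2 : q a <;> simp [h, h2, ih]

theorem pvKeyFilter_congr (u v : List (String × String × String))
    (l : List (String × String × String)) (h : ∀ t, t ∈ u ↔ t ∈ v) :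
    pvKeyFilter u l = pvKeyFilter v l := by
  induction l generalizing u v with
  | nil => rfl
  | cons x xs ih =>
    rw [pvKeyFilter_cons, pvKeyFilter_cons]
    by_cases hx : x ∈ u
    · rw [if_pos hx, if_pos ((h x).mp hx)]; exact ih u v h
    · rw [if_neg hx, if_neg (fun hv => hx ((h x).mpr hv))]
      exact congrArg (x :: ·) (ih (u ++ [x]) (v ++ [x]) (by intro t; simp [h t]))

theorem pvKeyFilter_append (u : List (String × String × String)) (y : String × String × String)
    (l : List (String × String × String)) :
    pvKeyFilter (u ++ [y]) l = (pvKeyFilter u l).filter (fun t => t != y) := by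
  induction l generalizing u with
  | nil => rfl
  | cons x xs ih =>
    rw [pvKeyFilter_cons, pvKeyFilter_cons]
    by_cases hx : x ∈ u
    · rw [if_pos (by simp [hx]), if_pos hx]; exact ih u
    · by_cases hxy : x = y
      · subst hxy
        rw [if_pos (by simp), if_neg hx, List.filter_cons_of_neg (by simp)]
        calc pvKeyFilter (u ++ [x]) xs
            = pvKeyFilter (u ++ [x] ++ [x]) xs :=
              pvKeyFilter_congr _ _ xs (by intro t; simp; try tauto)
          _ = (pvKeyFilter (u ++ [x]) xs).filter (fun t => t != x) := ih (u ++ [x])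
      · rw [if_neg (by simp [hx, hxy]), if_neg hx,
          List.filter_cons_of_pos (by simp [hxy])]
        refine congrArg (x :: ·) ?_
        calc pvKeyFilter (u ++ [y] ++ [x]) xs
            = pvKeyFilter (u ++ [x] ++ [y]) xs :=
              pvKeyFilter_congr _ _ xs (by intro t; simp; try tauto)
          _ = (pvKeyFilter (u ++ [x]) xs).filter (fun t => t != y) := ih (u ++ [x])

theorem pvKeyFilter_add (u : PySem.Set (String × String × String))
    (y : String × String × String) (l : List (String × String × String)) :
    pvKeyFilter (PySem.Set.add u y) l = (pvKeyFilter u l).filter (fun t => t != y) := by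
  rw [pvKeyFilter_congr (PySem.Set.add u y) (u ++ [y]) l
    (by intro t; rw [PySem.Set.mem_add]; simp)]
  exact pvKeyFilter_append u y l

theorem pvMem_keyFilter (u l : List (String × String × String))
    (t : String × String × String) :
    t ∈ pvKeyFilter u l ↔ t ∈ l ∧ t ∉ u := by
  induction l generalizing u with
  | nil => simp [pvKeyFilter]
  | cons x xs ih =>
    rw [pvKeyFilter_cons]
    by_cases hx : x ∈ u
    · rw [if_pos hx, ih]
      constructor
      · rintro ⟨h1, h2⟩; exact ⟨by simp [h1], h2⟩
      · rintro ⟨h1, h2⟩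
        rcases List.mem_cons.mp h1 with h | h
        · exact absurd (h ▸ hx) h2
        · exact ⟨h, h2⟩
    · rw [if_neg hx]
      simp only [List.mem_cons, ih (u ++ [x])]
      constructor
      · rintro (rfl | ⟨h1, h2⟩)
        · exact ⟨Or.inl rfl, hx⟩
        · exact ⟨Or.inr h1, fun hu => h2 (by simp [hu])⟩
      · rintro ⟨rfl | h1, h2⟩
        · exact Or.inl rfl
        · by_cases hxt : t = x
          · exact Or.inl hxt
          · exact Or.inr ⟨h1, by simp [hxt, h2]⟩

theorem pvLength_keyFilter_le (u l : List (String × String × String)) :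
    (pvKeyFilter u l).length ≤ l.length := by
  induction l generalizing u with
  | nil => simp [pvKeyFilter]
  | cons x xs ih =>
    rw [pvKeyFilter_cons]
    by_cases hx : x ∈ u
    · rw [if_pos hx]; exact Nat.le_succ_of_le (ih u)
    · rw [if_neg hx]; simpa using ih (u ++ [x])

-- pvKeyFilter u l is the dedup of l with the members of u filtered away
theorem pvKeyFilter_eq_filter (u l : List (String × String × String)) :
    pvKeyFilter u l = (pvKeyFilter [] l).filter (fun t => !decide (t ∈ u)) := by
  induction u using List.reverseRecOn with
  | nil => simp
  | append_singleton u y ih =>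
    rw [pvKeyFilter_append, ih, List.filter_filter]
    exact List.filter_congr (by intro t _; by_cases h1 : t = y <;> by_cases h2 : t ∈ u <;>
      simp [h1, h2])

theorem pvKeyFilter_nodup (u l : List (String × String × String)) :
    (pvKeyFilter u l).Nodup := by
  induction l generalizing u with
  | nil => simp [pvKeyFilter]
  | cons x xs ih =>
    rw [pvKeyFilter_cons]
    by_cases hx : x ∈ u
    · rw [if_pos hx]; exact ih u
    · rw [if_neg hx]
      refine List.nodup_cons.mpr ⟨fun hmem => ?_, ih (u ++ [x])⟩
      exact ((pvMem_keyFilter (u ++ [x]) xs x).mp hmem).2 (by simp)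

-- A's scan with the used-set = first-match over the unused distinct mentions
theorem pvFindA_eq (l : List (String × String × String))
    (u : PySem.Set (String × String × String)) (cur : List String) :
    pvFindA l u cur = (pvKeyFilter u l).find? (fun t => cur.contains (pvFwi t)) := by
  induction l generalizing u with
  | nil => rfl
  | cons x xs ih =>
    unfold pvFindA
    by_cases hx : x ∈ u
    · have hcu : PySem.Set.contains u x = true := by simp [PySem.Set.contains, hx]
      have hA : (!(PySem.Set.contains u x) && cur.contains (pvFwi x)) = false := by
        rw [hcu]; rfl
      rw [pvKeyFilter_cons, if_pos hx,
        List.find?_cons_of_neg (by simp only [hA]; simp), ← pvFindA]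
      exact ih u
    · have hcu : PySem.Set.contains u x = false := by simp [PySem.Set.contains, hx]
      rw [pvKeyFilter_cons, if_neg hx]
      cases hm : cur.contains (pvFwi x) with
      | true =>
        have hA : (!(PySem.Set.contains u x) && cur.contains (pvFwi x)) = true := by
          rw [hcu, hm]; rfl
        rw [List.find?_cons_of_pos (by exact hA), List.find?_cons_of_pos (by exact hm)]
      | false =>
        have hA : (!(PySem.Set.contains u x) && cur.contains (pvFwi x)) = false := by
          rw [hcu, hm]; rfl
        rw [List.find?_cons_of_neg (by simp only [hA]; simp),
          List.find?_cons_of_neg (by simp only [hm]; simp), ← pvFindA, ih u,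
          pvKeyFilter_append, pvFind?_filter]
        refine pvFind?_congr _ _ _ ?_
        intro t _
        by_cases htx : t = x
        · subst htx; rw [hm]; simp
        · simp [htx]

-- find over a list vs find over its index range
theorem pvFind_range {α : Type} (l : List α) (p : α → Bool) (d : α) :
    l.find? p = ((List.range l.length).find? (fun i => p (l.getD i d))).map
      (fun i => l.getD i d) := by
  induction l generalizing p with
  | nil => rfl
  | cons x xs ih =>
    rw [show (x :: xs).length = xs.length + 1 from rfl, List.range_succ_eq_map]
    cases hp : p x with
    | true =>
      rw [List.find?_cons_of_pos (by exact hp),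
        List.find?_cons_of_pos (by simpa using hp)]
      rfl
    | false =>
      rw [List.find?_cons_of_neg (by simp [hp]),
        List.find?_cons_of_neg (by simp [hp]), List.find?_map, Option.map_map,
        ih p]
      rfl

theorem pvRangeFind_some (n : Nat) (P : Nat → Bool) (b : Nat)
    (h : (List.range n).find? P = some b) : b < n ∧ P b = true :=
  ⟨List.mem_range.mp (List.mem_of_find?_eq_some h), List.find?_some h⟩

theorem pvGetD_map {α β : Type} (l : List α) (f : α → β) (i : Nat) (hi : i < l.length)
    (d : α) (d' : β) : (l.map f).getD i d' = f (l.getD i d) := by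
  rw [List.getD_eq_getElem _ _ (by simpa using hi), List.getD_eq_getElem _ _ hi,
    List.getElem_map]

-- marking order[b] used = adding order[b] to the used-set, through the boolean view
theorem pvMap_set_add (order : List (String × String × String)) (hnd : order.Nodup)
    (u : PySem.Set (String × String × String)) (b : Nat) (hb : b < order.length) :
    order.map (fun t => decide (t ∈ PySem.Set.add u (order.getD b pvD))) =
      (order.map (fun t => decide (t ∈ u))).set b true := by
  refine List.ext_getElem (by simp) ?_
  intro i h1 h2
  have hi : i < order.length := by simpa using h1
  simp only [List.getElem_map, List.getElem_set]
  have hbd : order.getD b pvD = order[b] := List.getD_eq_getElem _ _ hb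
  simp only [hbd]
  by_cases hbi : b = i
  · subst hbi
    simp [PySem.Set.mem_add]
  · rw [if_neg hbi]
    have hne : order[i] ≠ order[b] := by
      intro h; exact hbi (hnd.getElem_inj_iff.mp h).symm
    simp [PySem.Set.mem_add, hne]

-- Option-min (the accumulator update of B's best-candidate loop)
def pvOMin : Option Nat → Option Nat → Option Nat
  | b, none => b
  | none, some p => some p
  | some v, some p => some (min v p)

theorem pvOMin_none_left (o : Option Nat) : pvOMin none o = o := by cases o <;> rfl

theorem pvOMin_assoc (a b c : Option Nat) :
    pvOMin (pvOMin a b) c = pvOMin a (pvOMin b c) := by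
  cases a <;> cases b <;> cases c <;> simp [pvOMin, Nat.min_assoc]

theorem pvBestB_eq_fold (index : PySem.Dict String (List Nat)) (used : List Bool)
    (cur : List String) :
    pvBestB index used cur =
      cur.foldl (fun b ci =>
        pvOMin b ((PySem.Dict.getD index ci []).find? (fun p => !(used.getD p true)))) none := by
  unfold pvBestB
  refine congrFun (congrFun (congrArg _ ?_) _) _
  funext b ci
  cases (PySem.Dict.getD index ci []).find? (fun p => !(used.getD p true)) <;> cases b <;> rfl

theorem pvFold_omin (f : String → Option Nat) (cur : List String) (b0 : Option Nat) :
    cur.foldl (fun b ci => pvOMin b (f ci)) b0 =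
      pvOMin b0 (cur.foldl (fun b ci => pvOMin b (f ci)) none) := by
  induction cur generalizing b0 with
  | nil => rfl
  | cons c cur ih =>
    simp only [List.foldl_cons]
    rw [ih (pvOMin b0 (f c)), ih (pvOMin none (f c)), pvOMin_none_left, pvOMin_assoc]

-- min of two finds over a strictly increasing list is the find of the disjunction
theorem pvOMin_find_disj (L : List Nat) (hL : L.Pairwise (· < ·)) (q r s : Nat → Bool) :
    pvOMin (L.find? (fun p => q p && r p)) (L.find? (fun p => q p && s p)) =
      L.find? (fun p => q p && (r p || s p)) := by
  induction L with
  | nil => rfl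
  | cons x xs ih =>
    have hx : ∀ y ∈ xs, x < y := (List.pairwise_cons.mp hL).1
    have htail := ih (List.pairwise_cons.mp hL).2
    by_cases hq : q x = true
    · by_cases hr : r x = true
      · by_cases hs : s x = true
        · rw [List.find?_cons_of_pos (p := fun p => q p && r p) (by simp [hq, hr]),
            List.find?_cons_of_pos (p := fun p => q p && s p) (by simp [hq, hs]),
            List.find?_cons_of_pos (p := fun p => q p && (r p || s p)) (by simp [hq, hr])]
          simp [pvOMin]
        · rw [List.find?_cons_of_pos (p := fun p => q p && r p) (by simp [hq, hr]),
            List.find?_cons_of_neg (p := fun p => q p && s p) (by simp [hs]),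
            List.find?_cons_of_pos (p := fun p => q p && (r p || s p)) (by simp [hq, hr])]
          cases hf : xs.find? (fun p => q p && s p) with
          | none => rfl
          | some y =>
            have hy := List.mem_of_find?_eq_some hf
            simp [pvOMin, Nat.min_eq_left (Nat.le_of_lt (hx y hy))]
      · by_cases hs : s x = true
        · rw [List.find?_cons_of_neg (p := fun p => q p && r p) (by simp [hr]),
            List.find?_cons_of_pos (p := fun p => q p && s p) (by simp [hq, hs]),
            List.find?_cons_of_pos (p := fun p => q p && (r p || s p)) (by simp [hq, hs])]
          cases hf : xs.find? (fun p => q p && r p) with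
          | none => rfl
          | some y =>
            have hy := List.mem_of_find?_eq_some hf
            simp [pvOMin, Nat.min_eq_right (Nat.le_of_lt (hx y hy))]
        · rw [List.find?_cons_of_neg (p := fun p => q p && r p) (by simp [hr]),
            List.find?_cons_of_neg (p := fun p => q p && s p) (by simp [hs]),
            List.find?_cons_of_neg (p := fun p => q p && (r p || s p)) (by simp [hr, hs])]
          exact htail
    · rw [List.find?_cons_of_neg (p := fun p => q p && r p) (by simp [hq]),
        List.find?_cons_of_neg (p := fun p => q p && s p) (by simp [hq]),
        List.find?_cons_of_neg (p := fun p => q p && (r p || s p)) (by simp [hq])]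
      exact htail

-- B's best-candidate loop = first unused matching position in file order
theorem pvBestB_char (index : PySem.Dict String (List Nat)) (used : List Bool)
    (order : List (String × String × String))
    (hidx : ∀ ci, PySem.Dict.getD index ci [] =
      (List.range order.length).filter (fun p => pvFwi (order.getD p pvD) == ci))
    (cur : List String) :
    pvBestB index used cur = (List.range order.length).find?
      (fun p => !(used.getD p true) && cur.contains (pvFwi (order.getD p pvD))) := by
  rw [pvBestB_eq_fold]
  induction cur with
  | nil =>
    refine (List.find?_eq_none.mpr ?_).symm
    intro x _
    simp
  | cons c cur ih =>
    simp only [List.foldl_cons]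
    rw [pvFold_omin, pvOMin_none_left, ih, hidx c, pvFind?_filter,
      pvFind?_congr (fun p => (pvFwi (order.getD p pvD) == c) && !(used.getD p true))
        (fun p => !(used.getD p true) && (pvFwi (order.getD p pvD) == c)) _
        (by intro p _; exact Bool.and_comm _ _),
      pvOMin_find_disj _ (List.pairwise_lt_range) (fun p => !(used.getD p true))
        (fun p => pvFwi (order.getD p pvD) == c)
        (fun p => cur.contains (pvFwi (order.getD p pvD)))]
    refine pvFind?_congr _ _ _ ?_
    intro p _
    rw [List.contains_cons]

-- the first loop of B: order is the dedup of the file, and seen maps each mention of the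
-- file to its position in order
theorem pvSeenOrder_aux (l : List (String × String × String))
    (d : PySem.Dict (String × String × String) Nat) (s : List (String × String × String))
    (hinv : ∀ t, (match d.get? t with
      | none => t ∉ s
      | some i => i < s.length ∧ s.getD i pvD = t)) :
    (l.foldl (fun st tup =>
        if PySem.Dict.contains st.1 tup then st
        else (PySem.Dict.insert st.1 tup st.2.length, st.2 ++ [tup])) (d, s)).2 =
      s ++ pvKeyFilter s l ∧
    ∀ t, (match (l.foldl (fun st tup =>
        if PySem.Dict.contains st.1 tup then st
        else (PySem.Dict.insert st.1 tup st.2.length, st.2 ++ [tup])) (d, s)).1.get? t with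
      | none => t ∉ (l.foldl (fun st tup =>
          if PySem.Dict.contains st.1 tup then st
          else (PySem.Dict.insert st.1 tup st.2.length, st.2 ++ [tup])) (d, s)).2
      | some i => i < (l.foldl (fun st tup =>
          if PySem.Dict.contains st.1 tup then st
          else (PySem.Dict.insert st.1 tup st.2.length, st.2 ++ [tup])) (d, s)).2.length ∧
          (l.foldl (fun st tup =>
          if PySem.Dict.contains st.1 tup then st
          else (PySem.Dict.insert st.1 tup st.2.length, st.2 ++ [tup])) (d, s)).2.getD i pvD = t) := by
  induction l generalizing d s with
  | nil => exact ⟨by simp [pvKeyFilter], hinv⟩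
  | cons x xs ih =>
    simp only [List.foldl_cons]
    by_cases hc : PySem.Dict.contains d x = true
    · have hxs : x ∈ s := by
        have := hinv x
        rw [PySem.Dict.contains_eq_isSome_get?] at hc
        cases hg : d.get? x with
        | none => rw [hg] at hc; simp at hc
        | some i =>
          rw [hg] at this
          rw [← this.2, List.getD_eq_getElem _ _ this.1]
          exact List.getElem_mem this.1
      rw [if_pos hc, pvKeyFilter_cons, if_pos hxs]
      exact ih d s hinv
    · have hxs : x ∉ s := by
        have := hinv x
        rw [PySem.Dict.contains_eq_isSome_get?] at hc
        cases hg : d.get? x with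
        | none => rw [hg] at this; exact this
        | some i => rw [hg] at hc; simp at hc
      rw [if_neg hc]
      have hinv' : ∀ t, (match (PySem.Dict.insert d x s.length).get? t with
          | none => t ∉ s ++ [x]
          | some i => i < (s ++ [x]).length ∧ (s ++ [x]).getD i pvD = t) := by
        intro t
        rw [PySem.Dict.get?_insert]
        by_cases ht : t = x
        · subst ht
          rw [if_pos rfl]
          refine ⟨by simp, ?_⟩
          rw [List.getD_eq_getElem _ _ (by simp), List.getElem_concat_length rfl (by simp)]
        · rw [if_neg ht]
          have := hinv t
          cases hg : d.get? t with
          | none => rw [hg] at this; simp [this, ht]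
          | some i =>
            rw [hg] at this
            refine ⟨by simp; omega, ?_⟩
            rw [List.getD_eq_getElem _ _ (by simp; omega), List.getElem_append_left this.1,
              ← List.getD_eq_getElem _ pvD this.1, this.2]
      have := ih (PySem.Dict.insert d x s.length) (s ++ [x]) hinv'
      rw [pvKeyFilter_cons, if_neg hxs]
      exact ⟨by rw [this.1]; simp, this.2⟩

theorem pvSeenOrder_spec (file : List (String × String × String)) :
    (pvSeenOrder file).2 = pvKeyFilter [] file ∧
    ∀ t ∈ file, ∃ i, (pvSeenOrder file).1.get? t = some i ∧
      i < (pvSeenOrder file).2.length ∧ (pvSeenOrder file).2.getD i pvD = t := by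
  have h := pvSeenOrder_aux file PySem.Dict.empty [] (by
    intro t
    rw [PySem.Dict.get?_empty]
    simp)
  unfold pvSeenOrder
  refine ⟨by rw [h.1]; simp, ?_⟩
  intro t ht
  have h2 := h.2 t
  cases hg : (List.foldl _ (PySem.Dict.empty, []) file).1.get? t with
  | none =>
    rw [hg] at h2
    exfalso
    exact h2 (by rw [h.1]; simpa using (pvMem_keyFilter [] file t).mpr ⟨ht, by simp⟩)
  | some i =>
    rw [hg] at h2
    exact ⟨i, rfl, h2.1, h2.2⟩

-- the second loop of B: ciss parses every mention, index groups positions by first word index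
theorem pvParse_spec (order : List (String × String × String)) :
    (pvParse order).1 = order.map pvCis ∧
    ∀ ci, PySem.Dict.getD (pvParse order).2 ci [] =
      (List.range order.length).filter (fun p => pvFwi (order.getD p pvD) == ci) := by
  unfold pvParse
  have hsplit := PySem.List.foldl_prod_mk
    (fun (a : List (List String)) (e : (String × String × String) × Nat) => a ++ [pvCis e.1])
    (fun (d : PySem.Dict String (List Nat)) (e : (String × String × String) × Nat) =>
      PySem.Dict.modify d (pvFwi e.1) [] (· ++ [e.2]))
    order.zipIdx [] PySem.Dict.empty
  constructor
  · refine (congrArg Prod.fst hsplit).trans ?_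
    show order.zipIdx.foldl (fun acc e => acc ++ [pvCis e.1]) [] = order.map pvCis
    rw [PySem.List.foldl_append_singleton_eq_map]
    rw [show (fun (e : (String × String × String) × Nat) => pvCis e.1) = pvCis ∘ Prod.fst from rfl,
      ← List.map_map, List.zipIdx_map_fst]
    simp
  · intro ci
    refine (congrArg (fun d => PySem.Dict.getD d ci []) (congrArg Prod.snd hsplit)).trans ?_
    show PySem.Dict.getD (order.zipIdx.foldl
      (fun d e => PySem.Dict.modify d (pvFwi e.1) [] (· ++ [e.2])) PySem.Dict.empty) ci [] = _
    have hmapped : order.zipIdx.map (fun p => (pvFwi p.1, p.2)) =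
        (List.range order.length).map (fun i => (pvFwi (order.getD i pvD), i)) := by
      refine List.ext_getElem (by simp) ?_
      intro i h1 h2
      have hi : i < order.length := by simpa using h1
      rw [List.getElem_map, List.getElem_map, List.getElem_range, List.getElem_zipIdx,
        List.getD_eq_getElem _ _ hi]
      simp
    have hfold : order.zipIdx.foldl
        (fun dd (p : (String × String × String) × Nat) =>
          dd.modify (pvFwi p.1) [] (· ++ [p.2])) PySem.Dict.empty =
        (order.zipIdx.map (fun p => (pvFwi p.1, p.2))).foldl
          (fun dd (q : String × Nat) => dd.modify q.1 [] (· ++ [q.2])) PySem.Dict.empty := by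
      rw [List.foldl_map]
    rw [hfold, hmapped, PySem.Dict.getD_foldl_modify_append, PySem.Dict.getD_empty,
      List.filter_map, List.map_map]
    have : ((fun (x : String × Nat) => x.2) ∘ fun i => (pvFwi (order.getD i pvD), i)) =
        fun i => i := rfl
    rw [this, List.map_id']
    rfl

-- the chain loops agree: B's positional loop tracks A's tuple loop through the boolean view
theorem pvChain_eq (file : List (String × String × String)) :
    ∀ (fa fb : Nat) (chain cur : List String) (u : PySem.Set (String × String × String)),
    (∀ ci, PySem.Dict.getD (pvParse (pvKeyFilter [] file)).2 ci [] =
      (List.range (pvKeyFilter [] file).length).filter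
        (fun p => pvFwi ((pvKeyFilter [] file).getD p pvD) == ci)) →
    (pvKeyFilter u file).length < fa → (pvKeyFilter u file).length < fb →
    pvChainLoopB (pvKeyFilter [] file) (pvParse (pvKeyFilter [] file)).1
        (pvParse (pvKeyFilter [] file)).2 fb chain cur
        ((pvKeyFilter [] file).map (fun t => decide (t ∈ u))) =
      ((pvChainA file fa chain cur u).1,
        (pvKeyFilter [] file).map (fun t => decide (t ∈ (pvChainA file fa chain cur u).2))) := by
  intro fa
  induction fa with
  | zero => intro fb chain cur u _ ha _; omega
  | succ fa ih =>
    intro fb chain cur u hidx ha hb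
    set order := pvKeyFilter [] file with horder
    obtain ⟨fb, rfl⟩ : ∃ fb', fb = fb' + 1 := ⟨fb - 1, by omega⟩
    have hused : ∀ p, p < order.length →
        ((order.map (fun t => decide (t ∈ u))).getD p true) = decide (order.getD p pvD ∈ u) :=
      fun p hp => pvGetD_map order _ p hp pvD true
    have hfindA : pvFindA file u cur = order.find?
        (fun t => !decide (t ∈ u) && cur.contains (pvFwi t)) := by
      rw [pvFindA_eq, pvKeyFilter_eq_filter u file, ← horder, pvFind?_filter]
    have hbest : pvBestB (pvParse order).2 (order.map (fun t => decide (t ∈ u))) cur =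
        (List.range order.length).find?
          (fun p => !decide (order.getD p pvD ∈ u) && cur.contains (pvFwi (order.getD p pvD))) := by
      rw [pvBestB_char _ _ order hidx cur]
      refine pvFind?_congr _ _ _ ?_
      intro p hp
      rw [hused p (List.mem_range.mp hp)]
    have hrange : order.find? (fun t => !decide (t ∈ u) && cur.contains (pvFwi t)) =
        ((List.range order.length).find?
          (fun p => !decide (order.getD p pvD ∈ u) && cur.contains (pvFwi (order.getD p pvD)))).map
          (fun i => order.getD i pvD) :=
      pvFind_range order _ pvD
    simp only [pvChainLoopB, pvChainA]
    cases hrf : (List.range order.length).find?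
        (fun p => !decide (order.getD p pvD ∈ u) && cur.contains (pvFwi (order.getD p pvD))) with
    | none =>
      simp only [hbest, hfindA, hrange, hrf, Option.map_none]
    | some b =>
      have hbn := pvRangeFind_some _ _ _ hrf
      have hblt : b < order.length := hbn.1
      have hpb : (!decide (order.getD b pvD ∈ u) && cur.contains (pvFwi (order.getD b pvD))) = true :=
        hbn.2
      set tup := order.getD b pvD with htup
      have htu : tup ∉ u := by
        have := (Bool.and_eq_true _ _).mp hpb
        simpa using this.1
      have htfile : tup ∈ file := by
        have hmem : tup ∈ order := by
          rw [htup, List.getD_eq_getElem _ _ hblt]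
          exact List.getElem_mem hblt
        exact ((pvMem_keyFilter [] file tup).mp (horder ▸ hmem)).1
      have htkf : tup ∈ pvKeyFilter u file :=
        (pvMem_keyFilter u file tup).mpr ⟨htfile, htu⟩
      have hlen' : (pvKeyFilter (PySem.Set.add u tup) file).length < fa := by
        rw [pvKeyFilter_add]
        have : ((pvKeyFilter u file).filter (fun t => t != tup)).length <
            (pvKeyFilter u file).length :=
          List.length_filter_lt_length_iff_exists.mpr ⟨tup, htkf, by simp⟩
        omega
      have hlenb' : (pvKeyFilter (PySem.Set.add u tup) file).length < fb := by
        rw [pvKeyFilter_add]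
        have : ((pvKeyFilter u file).filter (fun t => t != tup)).length <
            (pvKeyFilter u file).length :=
          List.length_filter_lt_length_iff_exists.mpr ⟨tup, htkf, by simp⟩
        omega
      simp only [hbest, hfindA, hrange, hrf, Option.map_some]
      have hciss : (pvParse order).1.getD b [] = pvCis tup := by
        rw [(pvParse_spec order).1, pvGetD_map order pvCis b hblt pvD []]
      have hset : (order.map (fun t => decide (t ∈ u))).set b true =
          order.map (fun t => decide (t ∈ PySem.Set.add u tup)) :=
        (pvMap_set_add order (horder ▸ pvKeyFilter_nodup [] file) u b hblt).symm
      rw [hciss, hset]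
      exact ih fb (chain ++ [tup.1]) (pvCis tup) (PySem.Set.add u tup) hidx hlen' hlenb'

-- the outer per-mention loops agree through the boolean view of the used-set
theorem pvOuter_eq (file : List (String × String × String)) :
    ∀ (l : List (String × String × String)), (∀ t ∈ l, t ∈ file) →
    ∀ (cluster : List (List String)) (u : PySem.Set (String × String × String)),
    (l.foldl (pvStepA file) (cluster, u)).1 =
      (l.foldl (pvStepB (pvSeenOrder file).1 (pvSeenOrder file).2
          (pvParse (pvSeenOrder file).2).1 (pvParse (pvSeenOrder file).2).2)
        (cluster, (pvSeenOrder file).2.map (fun t => decide (t ∈ u)))).1 := by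
  have hso := pvSeenOrder_spec file
  set order := (pvSeenOrder file).2 with horder
  have hord : order = pvKeyFilter [] file := hso.1
  have hidx := (pvParse_spec order).2
  intro l
  induction l with
  | nil => intro _ _ _; rfl
  | cons t ts ih =>
    intro hl cluster u
    have htf : t ∈ file := hl t (by simp)
    have hl' : ∀ x ∈ ts, x ∈ file := fun x hx => hl x (by simp [hx])
    simp only [List.foldl_cons]
    by_cases hemp : (t.2.2 == "") = true
    · simp only [pvStepA, pvStepB, if_pos hemp]
      cases hp : PySem.Set.contains pvPronouns t.1 with
      | true => simp only [if_true]; exact ih hl' cluster u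
      | false =>
        simp only [Bool.false_eq_true, if_false]
        exact ih hl' (cluster ++ [[t.1]]) u
    · simp only [pvStepA, pvStepB, if_neg hemp]
      obtain ⟨pos, hget, hplt, hpt⟩ := hso.2 t htf
      rw [hget]
      simp only [Option.getD_some]
      have husedp : ((order.map (fun x => decide (x ∈ u))).getD pos true) = decide (t ∈ u) := by
        rw [pvGetD_map order _ pos hplt pvD true, hpt]
      rw [husedp]
      by_cases hu : t ∈ u
      · have hc : PySem.Set.contains u t = true := by simp [PySem.Set.contains, hu]
        rw [if_pos hc, if_pos (by simp [hu])]
        exact ih hl' cluster u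
      · have hc : PySem.Set.contains u t = false := by simp [PySem.Set.contains, hu]
        rw [hc, if_neg (show ¬(false = true) by simp),
          if_neg (show ¬(decide (t ∈ u) = true) by simp [hu])]
        have hku : (pvKeyFilter u file).length ≤ order.length := by
          rw [pvKeyFilter_eq_filter u file, ← hord]
          exact List.length_filter_le _ _
        have hkf : (pvKeyFilter u file).length ≤ file.length := pvLength_keyFilter_le u file
        have hch := pvChain_eq file (file.length + 1) (order.length + 1) [t.1] (pvCis t) u
          (by rw [← hord]; exact hidx) (by omega) (by omega)
        rw [← hord] at hch
        have hciss : (pvParse order).1.getD pos [] = pvCis t := by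
          rw [(pvParse_spec order).1, pvGetD_map order pvCis pos hplt pvD [], hpt]
        rw [hciss, hch]
        set r := pvChainA file (file.length + 1) [t.1] (pvCis t) u with hr
        have hset : (order.map (fun x => decide (x ∈ r.2))).set pos true =
            order.map (fun x => decide (x ∈ PySem.Set.add r.2 t)) := by
          have := pvMap_set_add order (hord ▸ pvKeyFilter_nodup [] file) r.2 pos hplt
          rw [hpt] at this
          exact this.symm
        simp only [hset]
        by_cases hlen : r.1.length > 1
        · rw [if_pos hlen]
          exact ih hl' (cluster ++ [r.1]) (PySem.Set.add r.2 t)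
        · rw [if_neg hlen]
          exact ih hl' cluster (PySem.Set.add r.2 t)

-- ===== VERDICT (by name: the statement is the Claim_ definition above) =====
theorem sal_coref_cluster_spec : Claim_equal_sal_coref_cluster := by
  intro sal _
  unfold Spec_sal_coref_cluster sal_coref_cluster sal_coref_cluster_alt
  refine List.map_congr_left ?_
  intro file _
  have hrep : List.replicate (pvSeenOrder file).2.length false =
      (pvSeenOrder file).2.map (fun t => decide (t ∈ (PySem.Set.empty : PySem.Set _))) := by
    rw [show (fun (t : String × String × String) =>
      decide (t ∈ (PySem.Set.empty : PySem.Set _))) = fun _ => false from ?_, List.map_const']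
    funext t
    simp [PySem.Set.empty]
  simp only [hrep]
  exact pvOuter_eq file file (fun _ h => h) [] PySem.Set.empty
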